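-- pv_equiv track=rewrite | github.com/zulip/zulip | analytics/views/stats.py | rewrite_client_arrays
-- ===== SOURCE A (Python) =====
-- from typing import Any, Dict, List, Optional, Tuple, Type, TypeVar, Union, cast
--
-- def client_label_map(name: str) -> str:
--     if name == "website":
--         return "Web app"
--     if name.startswith("desktop app"):
--         return "Old desktop app"
--     if name == "ZulipElectron":
--         return "Desktop app"
--     if name == "ZulipTerminal":
--         return "Terminal app"
--     if name == "ZulipAndroid":
--         return "Old Android app"
--     if name == "ZulipiOS":
--         return "Old iOS app"
--     if name == "ZulipMobile":
--         return "Mobile app"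
--     if name in ["ZulipPython", "API: Python"]:
--         return "Python API"
--     if name.startswith("Zulip") and name.endswith("Webhook"):
--         return name[len("Zulip") : -len("Webhook")] + " webhook"
--     return name
--
-- def rewrite_client_arrays(value_arrays: Dict[str, List[int]]) -> Dict[str, List[int]]:
--     mapped_arrays: Dict[str, List[int]] = {}
--     for label, array in value_arrays.items():
--         mapped_label = client_label_map(label)
--         if mapped_label in mapped_arrays:
--             for i in range(len(array)):
--                 mapped_arrays[mapped_label][i] += value_arrays[label][i]
--         else:
--             mapped_arrays[mapped_label] = [value_arrays[label][i] for i in range(len(array))]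
--     return mapped_arrays
-- ===== SOURCE B (Python) =====
-- def client_label_map(name: str) -> str:
--     if name == "website":
--         return "Web app"
--     if name.startswith("desktop app"):
--         return "Old desktop app"
--     if name == "ZulipElectron":
--         return "Desktop app"
--     if name == "ZulipTerminal":
--         return "Terminal app"
--     if name == "ZulipAndroid":
--         return "Old Android app"
--     if name == "ZulipiOS":
--         return "Old iOS app"
--     if name == "ZulipMobile":
--         return "Mobile app"
--     if name in ["ZulipPython", "API: Python"]:
--         return "Python API"
--     if name.startswith("Zulip") and name.endswith("Webhook"):
--         return name[len("Zulip") : -len("Webhook")] + " webhook"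
--     return name
--
--
-- def rewrite_client_arrays(value_arrays):
--     # Pass 1: group the arrays by their mapped client label (first-occurrence order).
--     groups = {}
--     for label, array in value_arrays.items():
--         groups.setdefault(client_label_map(label), []).append(array)
--     # Pass 2: sum each group element-wise into a zero-filled row.
--     result = {}
--     for mapped, arrays in groups.items():
--         row = [0] * max(len(a) for a in arrays)
--         for a in arrays:
--             for i, v in enumerate(a):
--                 row[i] += v
--         result[mapped] = row
--     return result
-- ===== Notes on version B (the rewrite author's own statement) =====
-- stated objective: alternative
-- what changed: B splits A's single copy-or-accumulate dict loop into two passes: first group the arrays by mapped client label (setdefault, first-occurrence order), then sum each group element-wise into a zero-filled row; Pre_ excludes association lists with duplicate labels (not representable as a Python dict) and the inputs on which A raises IndexError (a later array in a group longer than the group's first array).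
import Mathlib
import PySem

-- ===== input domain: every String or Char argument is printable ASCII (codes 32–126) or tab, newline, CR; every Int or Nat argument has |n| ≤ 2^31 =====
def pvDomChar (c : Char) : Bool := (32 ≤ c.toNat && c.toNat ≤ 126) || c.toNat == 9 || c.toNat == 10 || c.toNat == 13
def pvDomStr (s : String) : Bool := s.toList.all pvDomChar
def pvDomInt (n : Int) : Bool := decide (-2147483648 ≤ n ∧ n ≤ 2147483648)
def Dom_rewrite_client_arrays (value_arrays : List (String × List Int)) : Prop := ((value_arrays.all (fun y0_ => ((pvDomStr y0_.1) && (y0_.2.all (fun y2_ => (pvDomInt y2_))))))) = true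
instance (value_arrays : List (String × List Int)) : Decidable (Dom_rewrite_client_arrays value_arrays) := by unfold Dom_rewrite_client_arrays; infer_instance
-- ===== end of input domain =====

-- B replaces A's copy-or-accumulate dict loop by a group-then-sum two-pass decomposition (alternative, same cost).

-- ===== PORT A =====
def client_label_map (name : String) : String :=
  if name == "website" then "Web app"
  else if PySem.Str.startswith name "desktop app" then "Old desktop app"
  else if name == "ZulipElectron" then "Desktop app"
  else if name == "ZulipTerminal" then "Terminal app"
  else if name == "ZulipAndroid" then "Old Android app"
  else if name == "ZulipiOS" then "Old iOS app"
  else if name == "ZulipMobile" then "Mobile app"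
  else if name == "ZulipPython" || name == "API: Python" then "Python API"
  else if PySem.Str.startswith name "Zulip" && PySem.Str.endswith name "Webhook" then
    PySem.Str.slice name (some 5) (some (-7)) ++ " webhook"
  else name

-- value_arrays[label]: first-match lookup into the dict (assoc list); the .getD [] default is never
-- reached when label is a key of value_arrays (as in both Pythons).
def pvLookup (va : List (String × List Int)) (l : String) : List Int :=
  ((PySem.Dict.mk va).get? l).getD []

def rewrite_client_arrays (value_arrays : List (String × List Int)) : List (String × List Int) :=
  (value_arrays.foldl (fun mapped_arrays p =>
      let mapped_label := client_label_map p.1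
      if mapped_arrays.contains mapped_label then
        -- for i in range(len(array)): mapped_arrays[mapped_label][i] += value_arrays[label][i]
        -- (List.set is a no-op exactly where Python raises IndexError; those inputs are outside Pre_)
        mapped_arrays.modify mapped_label [] (fun tgt =>
          (List.range p.2.length).foldl
            (fun tgt i => tgt.set i (tgt.getD i 0 + (pvLookup value_arrays p.1).getD i 0)) tgt)
      else
        mapped_arrays.insert mapped_label
          ((List.range p.2.length).map (fun i => (pvLookup value_arrays p.1).getD i 0)))
    PySem.Dict.empty).items

-- ===== PORT B =====
def rewrite_client_arrays_alt (value_arrays : List (String × List Int)) : List (String × List Int) :=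
  -- Pass 1: groups.setdefault(client_label_map(label), []).append(array)
  -- Pass 2: row = [0] * max(len(a) for a in arrays); for a in arrays: for i, v in enumerate(a): row[i] += v
  -- (groups are never empty, so Python's max over the generator always receives a value; .getD 0 is a
  -- totality default for that unreachable case. enumerate indices are nonnegative, so .toNat is exact.)
  (((value_arrays.foldl
      (fun g p => g.modify (client_label_map p.1) [] (fun ls => ls ++ [p.2]))
      PySem.Dict.empty).items).foldl (fun result q =>
      result.insert q.1
        (q.2.foldl (fun row a =>
            (PySem.List.enumerate a 0).foldl
              (fun row iv => row.set iv.1.toNat (row.getD iv.1.toNat 0 + iv.2)) row)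
          (List.replicate ((PySem.List.max? (q.2.map List.length) (fun x => x)).getD 0) (0 : Int))))
    PySem.Dict.empty).items

-- ===== PRECONDITION & SPEC =====
-- Pre_ excludes (a) assoc lists with duplicate labels, which no Python dict can represent, and
-- (b) inputs where, under one mapped label, a later array is longer than the first one's array —
-- exactly the inputs on which A raises IndexError.
def Pre_rewrite_client_arrays (value_arrays : List (String × List Int)) : Prop :=
  (value_arrays.map Prod.fst).Nodup ∧
  ∀ p ∈ value_arrays,
    p.2.length ≤ ((value_arrays.filter
      (fun q => client_label_map q.1 == client_label_map p.1)).headD ("", [])).2.length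
instance (value_arrays : List (String × List Int)) : Decidable (Pre_rewrite_client_arrays value_arrays) := by
  unfold Pre_rewrite_client_arrays; infer_instance

def pvWitness_rewrite_client_arrays : (List (String × List Int)) :=
  [("website", [1, 2]), ("ZulipMobile", [3])]

def Spec_rewrite_client_arrays (value_arrays : List (String × List Int)) (out : List (String × List Int)) : Prop := out = rewrite_client_arrays_alt value_arrays
instance (value_arrays : List (String × List Int)) (out : List (String × List Int)) : Decidable (Spec_rewrite_client_arrays value_arrays out) := by unfold Spec_rewrite_client_arrays; infer_instance

-- ===== CLAIM (what is proved, stated in full; the proofs are below) =====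
def Claim_equal_rewrite_client_arrays : Prop := ∀ (value_arrays : List (String × List Int)), Dom_rewrite_client_arrays value_arrays → Pre_rewrite_client_arrays value_arrays → Spec_rewrite_client_arrays value_arrays (rewrite_client_arrays value_arrays)

-- ===== LEMMAS AND PROOFS =====

-- A's inner accumulation loop, named for the proofs
def pvFoldAdd (n : Nat) (t s : List Int) : List Int :=
  (List.range n).foldl (fun tgt i => tgt.set i (tgt.getD i 0 + s.getD i 0)) t

-- one output row of A's result per group of labels, named for the proofs
def pvRow (F : String → List Int) (labels : List String) : List Int :=
  (List.range (F (labels.headD "")).length).map (fun i =>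
    ((labels.filter (fun l => decide (i < (F l).length))).map (fun l => (F l).getD i 0)).sum)

-- B's row computation over a group's list of arrays, named for the proofs
def pvRowArr (arrays : List (List Int)) : List Int :=
  arrays.foldl (fun row a =>
      (PySem.List.enumerate a 0).foldl
        (fun row iv => row.set iv.1.toNat (row.getD iv.1.toNat 0 + iv.2)) row)
    (List.replicate ((PySem.List.max? (arrays.map List.length) (fun x => x)).getD 0) (0 : Int))

lemma pvFoldAdd_length (n : Nat) (t s : List Int) : (pvFoldAdd n t s).length = t.length := by
  induction n with
  | zero => rfl
  | succ n ih => simp [pvFoldAdd, List.range_succ, List.foldl_append] at ih ⊢; exact ih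

lemma pvFoldAdd_getElem (n : Nat) (t s : List Int) (i : Nat) (h : i < t.length) :
    (pvFoldAdd n t s)[i]'(by rw [pvFoldAdd_length]; exact h)
      = if i < n then t[i] + s.getD i 0 else t[i] := by
  induction n with
  | zero => simp [pvFoldAdd]
  | succ n ih =>
    have hlen : (pvFoldAdd n t s).length = t.length := pvFoldAdd_length n t s
    have hstep : pvFoldAdd (n+1) t s
        = (pvFoldAdd n t s).set n ((pvFoldAdd n t s).getD n 0 + s.getD n 0) := by
      simp [pvFoldAdd, List.range_succ, List.foldl_append]
    rw [List.getElem_of_eq hstep, List.getElem_set]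
    by_cases hni : n = i
    · subst hni
      have hlt : n < (pvFoldAdd n t s).length := by omega
      rw [if_pos rfl, List.getD_eq_getElem _ _ hlt, ih]
      simp
    · rw [if_neg hni, ih]
      split_ifs <;> first | rfl | omega

lemma pvRangeCopy (s : List Int) : (List.range s.length).map (fun i => s.getD i 0) = s := by
  apply List.ext_getElem
  · simp
  · intro i h1 h2
    simp [List.getElem?_eq_getElem h2, List.getD]

lemma pvRow_length (F : String → List Int) (labels : List String) :
    (pvRow F labels).length = (F (labels.headD "")).length := by simp [pvRow]

lemma pvRow_singleton (F : String → List Int) (l : String) : pvRow F [l] = F l := by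
  apply List.ext_getElem
  · simp [pvRow]
  · intro i h1 h2
    simp only [pvRow, List.getElem_map, List.getElem_range]
    rw [List.filter_singleton]
    have hi : i < (F l).length := by simpa [pvRow] using h1
    simp [hi]

lemma pvRow_snoc (F : String → List Int) (v : List String) (l : String) (hv : v ≠ []) :
    pvFoldAdd (F l).length (pvRow F v) (F l) = pvRow F (v ++ [l]) := by
  obtain ⟨h, t, rfl⟩ := List.exists_cons_of_ne_nil hv
  apply List.ext_getElem
  · rw [pvFoldAdd_length, pvRow_length, pvRow_length]; simp
  · intro i h1 h2
    have hi : i < (pvRow F (h :: t)).length := by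
      rw [pvFoldAdd_length] at h1; exact h1
    rw [pvFoldAdd_getElem _ _ _ _ hi]
    simp only [pvRow, List.getElem_map, List.getElem_range, List.filter_append,
      List.map_append, List.sum_append, List.filter_singleton]
    by_cases hl : i < (F l).length
    · simp [hl]
    · simp [hl]

lemma pvMain (F : String → List Int) (xs : List (String × List Int)) :
    (((xs.foldl (fun acc p =>
        if acc.contains (client_label_map p.1) then
          acc.modify (client_label_map p.1) [] (fun tgt => pvFoldAdd (F p.1).length tgt (F p.1))
        else acc.insert (client_label_map p.1) (F p.1)) PySem.Dict.empty).items
      = ((xs.foldl (fun g p => g.modify (client_label_map p.1) [] (fun ls => ls ++ [p.1]))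
            PySem.Dict.empty).items).map (fun q => (q.1, pvRow F q.2)))
    ∧ ∀ q ∈ (xs.foldl (fun g p => g.modify (client_label_map p.1) [] (fun ls => ls ++ [p.1]))
          PySem.Dict.empty).items, q.2 ≠ []) := by
  induction xs using List.reverseRecOn with
  | nil => exact ⟨rfl, by intro q hq; simp [PySem.Dict.empty] at hq⟩
  | append_singleton xs p ih =>
    obtain ⟨ihEq, ihNe⟩ := ih
    simp only [List.foldl_append, List.foldl_cons, List.foldl_nil]
    set k := client_label_map p.1 with hk
    set dA := xs.foldl (fun acc p =>
        if acc.contains (client_label_map p.1) then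
          acc.modify (client_label_map p.1) [] (fun tgt => pvFoldAdd (F p.1).length tgt (F p.1))
        else acc.insert (client_label_map p.1) (F p.1)) PySem.Dict.empty with hdA
    set dG := xs.foldl (fun g p => g.modify (client_label_map p.1) [] (fun ls => ls ++ [p.1]))
        PySem.Dict.empty with hdG
    have hkeys : dA.contains k = dG.contains k := by
      simp only [PySem.Dict.contains, ihEq, List.any_map]; rfl
    have hndG : dG.keys.Nodup := by
      rw [hdG]
      exact PySem.Dict.nodup_keys_foldl_modify_key xs (fun p => client_label_map p.1) []
        (fun d p => (fun ls => ls ++ [p.1])) PySem.Dict.empty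
        (by simp [PySem.Dict.empty, PySem.Dict.keys])
    have hget : dA.get? k = (dG.get? k).map (fun v => pvRow F v) := by
      simp only [PySem.Dict.get?, ihEq, List.find?_map, Option.map_map]; rfl
    have hmodG : dG.modify k [] (fun ls => ls ++ [p.1]) = dG.insert k (dG.getD k [] ++ [p.1]) := rfl
    by_cases hc : dG.contains k = true
    · -- mapped label already present
      obtain ⟨v, hv⟩ : ∃ v, dG.get? k = some v := by
        rcases hx : dG.get? k with _ | v
        · rw [PySem.Dict.get?_eq_none_iff_contains] at hx; rw [hx] at hc; simp at hc
        · exact ⟨v, rfl⟩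
      have hgD : dG.getD k [] = v := by simp [PySem.Dict.getD, hv]
      have hvA : dA.getD k [] = pvRow F v := by simp [PySem.Dict.getD, hget, hv]
      have hcA : dA.contains k = true := by rw [hkeys]; exact hc
      have hmodA : dA.modify k [] (fun tgt => pvFoldAdd (F p.1).length tgt (F p.1))
          = dA.insert k (pvFoldAdd (F p.1).length (pvRow F v) (F p.1)) := by
        simp [PySem.Dict.modify, hvA]
      constructor
      · rw [if_pos hcA, hmodA, hmodG, hgD,
          PySem.Dict.items_insert_of_contains dA _ hcA,
          PySem.Dict.items_insert_of_contains dG _ hc,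
          ihEq, List.map_map, List.map_map]
        apply List.map_congr_left
        intro q hq
        by_cases hq1 : (q.1 == k) = true
        · have hq1' : q.1 = k := by simpa using hq1
          have hvq : dG.get? k = some q.2 := by
            apply PySem.Dict.get?_of_mem_items dG _ hndG
            rw [← hq1']; exact hq
          have hqv : q.2 = v := by rw [hvq] at hv; exact Option.some.inj hv
          have hne : q.2 ≠ [] := ihNe q hq
          simp only [Function.comp_apply, hq1']
          simp only [beq_self_eq_true, if_true]
          rw [← hqv, pvRow_snoc F q.2 p.1 hne]
        · simp only [Function.comp_apply]
          rw [if_neg hq1, if_neg hq1]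
      · rw [hmodG, PySem.Dict.items_insert_of_contains dG _ hc]
        intro q' hq'
        obtain ⟨q, hq, rfl⟩ := List.mem_map.mp hq'
        by_cases hq1 : (q.1 == k) = true
        · simp [hq1]
        · rw [if_neg hq1]; exact ihNe q hq
    · -- new mapped label
      have hcb : dG.contains k = false := by simpa using hc
      have hcA : dA.contains k = false := by rw [hkeys]; exact hcb
      have hgnone : dG.get? k = none := (PySem.Dict.get?_eq_none_iff_contains dG k).mpr hcb
      have hgD : dG.getD k [] = [] := by simp [PySem.Dict.getD, hgnone]
      constructor
      · rw [if_neg (by simp [hcA]), hmodG, hgD,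
          PySem.Dict.items_insert_of_not_contains dA _ hcA,
          PySem.Dict.items_insert_of_not_contains dG _ hcb,
          ihEq, List.map_append]
        simp [pvRow_singleton]
      · rw [hmodG, hgD, PySem.Dict.items_insert_of_not_contains dG _ hcb]
        intro q' hq'
        rcases List.mem_append.mp hq' with h1 | h2
        · exact ihNe q' h1
        · simp at h2; simp [h2]

lemma pvLookup_eq (va : List (String × List Int)) (hnd : (va.map Prod.fst).Nodup)
    (p : String × List Int) (hp : p ∈ va) : pvLookup va p.1 = p.2 := by
  have hmem : (p.1, p.2) ∈ (PySem.Dict.mk va).items := by simpa using hp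
  have hk : (PySem.Dict.mk va).keys.Nodup := by
    simpa [PySem.Dict.keys] using hnd
  rw [pvLookup, PySem.Dict.get?_of_mem_items _ hmem hk]
  rfl

-- B's inner enumerate-loop over one array IS A's index-accumulation loop
lemma pvEnumFold (a : List Int) (row : List Int) :
    (PySem.List.enumerate a 0).foldl
      (fun row iv => row.set iv.1.toNat (row.getD iv.1.toNat 0 + iv.2)) row
    = pvFoldAdd a.length row a := by
  rw [PySem.List.enumerate_eq_map_pyRange (d := 0), List.foldl_map]
  simp only [PySem.List.len]
  rw [PySem.List.pyRange_zero_natCast, List.foldl_map]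
  unfold pvFoldAdd
  apply PySem.List.foldl_congr_mem
  intro acc i hi
  simp [PySem.List.pyGetD_natCast]

-- max(len(a) for a in arrays) = the first array's length, when every array is no longer
lemma pvMaxEq (arrays : List (List Int)) (a0 : List Int) (h0 : arrays.headD [] = a0)
    (hne : arrays ≠ []) (hle : ∀ a ∈ arrays, a.length ≤ a0.length) :
    ((PySem.List.max? (arrays.map List.length) (fun x => x)).getD 0) = a0.length := by
  obtain ⟨m, hm⟩ : ∃ m, PySem.List.max? (arrays.map List.length) (fun x => x) = some m := by
    rcases hx : PySem.List.max? (arrays.map List.length) (fun x => x) with _ | m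
    · rw [PySem.List.max?_eq_none_iff] at hx
      simp at hx
      exact absurd hx hne
    · exact ⟨m, rfl⟩
  have hmem := PySem.List.max?_mem hm
  have hmax := PySem.List.max?_isMax hm
  rw [hm]
  simp only [Option.getD_some]
  have h1 : m ≤ a0.length := by
    obtain ⟨a, ha, rfl⟩ := List.mem_map.mp hmem
    exact hle a ha
  have h2 : a0.length ≤ m := by
    apply hmax
    apply List.mem_map_of_mem
    obtain ⟨x, t, rfl⟩ := List.exists_cons_of_ne_nil hne
    simp at h0
    rw [← h0]
    exact List.mem_cons_self
  omega

-- the first step of B's accumulation copies the first array into the zero row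
lemma pvZeroAcc (a : List Int) : pvFoldAdd a.length (List.replicate a.length 0) a = a := by
  apply List.ext_getElem
  · rw [pvFoldAdd_length, List.length_replicate]
  · intro i h1 h2
    have hi : i < (List.replicate a.length (0:Int)).length := by simpa using h2
    rw [pvFoldAdd_getElem _ _ _ _ hi]
    simp [h2]

-- accumulating all arrays of a group into the zero row gives A's per-group row
lemma pvAccRow (F : String → List Int) (h : String) (t : List String) :
    (((h :: t).map F).foldl (fun row a => pvFoldAdd a.length row a)
        (List.replicate (F h).length 0)) = pvRow F (h :: t) := by
  induction t using List.reverseRecOn with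
  | nil => simpa [pvRow_singleton] using pvZeroAcc (F h)
  | append_singleton t l ih =>
    have hsplit : (h :: (t ++ [l])) = (h :: t) ++ [l] := by simp
    rw [hsplit, List.map_append, List.foldl_append]
    simp only [List.map_cons, List.map_nil, List.foldl_cons, List.foldl_nil] at ih ⊢
    rw [ih]
    exact pvRow_snoc F (h :: t) l (by simp)

lemma pvRowArr_eq (F : String → List Int) (h : String) (t : List String)
    (hle : ∀ l ∈ h :: t, (F l).length ≤ (F h).length) :
    pvRowArr ((h :: t).map F) = pvRow F (h :: t) := by
  unfold pvRowArr
  rw [pvMaxEq (((h :: t).map F).map List.length |> fun _ => ((h :: t).map F)) (F h)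
    (by simp) (by simp) ?hle]
  case hle =>
    intro a ha
    obtain ⟨l, hl, rfl⟩ := List.mem_map.mp ha
    exact hle l hl
  have hstep : (fun (row : List Int) (a : List Int) =>
      (PySem.List.enumerate a 0).foldl
        (fun row iv => row.set iv.1.toNat (row.getD iv.1.toNat 0 + iv.2)) row)
      = (fun row a => pvFoldAdd a.length row a) := by
    funext row a
    exact pvEnumFold a row
  rw [hstep]
  exact pvAccRow F h t

-- the grouping fold's value at key k is the projection of the matching entries, in order
lemma pvGroupGetD {α : Type} (va : List (String × List Int)) (proj : String × List Int → α)
    (k : String) :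
    (va.foldl (fun g p => g.modify (client_label_map p.1) [] (fun ls => ls ++ [proj p]))
        PySem.Dict.empty).getD k []
    = (va.filter (fun p => client_label_map p.1 == k)).map proj := by
  have h1 : va.foldl (fun g p => g.modify (client_label_map p.1) [] (fun ls => ls ++ [proj p]))
        PySem.Dict.empty
      = (va.map (fun p => (client_label_map p.1, proj p))).foldl
          (fun d q => d.modify q.1 [] (fun ls => ls ++ [q.2])) PySem.Dict.empty := by
    rw [List.foldl_map]
  rw [h1, PySem.Dict.getD_foldl_modify_append]
  simp [List.filter_map, Function.comp_def]

-- ===== VERDICT (by name: the statement is the Claim_ definition above) =====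
theorem rewrite_client_arrays_spec : Claim_equal_rewrite_client_arrays := by
  intro va _ hpre
  obtain ⟨hnd, hlen⟩ := hpre
  unfold Spec_rewrite_client_arrays
  unfold rewrite_client_arrays rewrite_client_arrays_alt
  -- A's fold, with value_arrays[label] resolved to the entry's own array
  rw [PySem.List.foldl_congr_mem va _
    (fun acc p =>
      if acc.contains (client_label_map p.1) then
        acc.modify (client_label_map p.1) []
          (fun tgt => pvFoldAdd (pvLookup va p.1).length tgt (pvLookup va p.1))
      else acc.insert (client_label_map p.1) (pvLookup va p.1))
    PySem.Dict.empty ?_]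
  swap
  · intro acc p hp
    have hl := pvLookup_eq va hnd p hp
    simp only [hl, pvFoldAdd, pvRangeCopy]
  rw [(pvMain (pvLookup va) va).1]
  -- name the two grouping dicts
  set dG := va.foldl (fun g p => g.modify (client_label_map p.1) [] (fun ls => ls ++ [p.1]))
      PySem.Dict.empty with hdG
  set dB := va.foldl (fun g p => g.modify (client_label_map p.1) [] (fun ls => ls ++ [p.2]))
      PySem.Dict.empty with hdB
  have hndG : dG.keys.Nodup := by
    rw [hdG]
    exact PySem.Dict.nodup_keys_foldl_modify_key va (fun p => client_label_map p.1) []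
      (fun d p => (fun ls => ls ++ [p.1])) PySem.Dict.empty
      (by simp [PySem.Dict.empty, PySem.Dict.keys])
  have hndB : dB.keys.Nodup := by
    rw [hdB]
    exact PySem.Dict.nodup_keys_foldl_modify_key va (fun p => client_label_map p.1) []
      (fun d p => (fun ls => ls ++ [p.2])) PySem.Dict.empty
      (by simp [PySem.Dict.empty, PySem.Dict.keys])
  have hkeys : dB.keys = dG.keys := by
    rw [hdB, hdG,
      PySem.Dict.keys_foldl_modify_key va (fun p => client_label_map p.1) []
        (fun d p => (fun ls => ls ++ [p.2])) PySem.Dict.empty,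
      PySem.Dict.keys_foldl_modify_key va (fun p => client_label_map p.1) []
        (fun d p => (fun ls => ls ++ [p.1])) PySem.Dict.empty]
    rfl
  -- B's second loop inserts fresh distinct keys: it appends one row per group
  show _ = (dB.items.foldl (fun result q => result.insert q.1 (pvRowArr q.2))
      PySem.Dict.empty).items
  rw [PySem.Dict.items_foldl_insert_fresh (k := fun q => q.1) (v := fun q => pvRowArr q.2)
    (d := PySem.Dict.empty) (l := dB.items)
    (by intro a _; simp [PySem.Dict.contains_empty]) (by exact hndB)]
  simp only [PySem.Dict.empty, List.nil_append]
  -- compare the two item lists key by key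
  rw [PySem.Dict.items_eq_map_keys dG hndG [], PySem.Dict.items_eq_map_keys dB hndB [],
    hkeys, List.map_map, List.map_map]
  apply List.map_congr_left
  intro k hk
  simp only [Function.comp_apply]
  -- the group's entries, in order
  have hG : dG.getD k [] = (va.filter (fun p => client_label_map p.1 == k)).map Prod.fst := by
    rw [hdG]; exact pvGroupGetD va Prod.fst k
  have hB : dB.getD k [] = (va.filter (fun p => client_label_map p.1 == k)).map Prod.snd := by
    rw [hdB]; exact pvGroupGetD va Prod.snd k
  have hmemItems : (k, dG.getD k []) ∈ dG.items := by
    rw [PySem.Dict.items_eq_map_keys dG hndG []]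
    exact List.mem_map_of_mem hk
  have hneG : dG.getD k [] ≠ [] := (pvMain (pvLookup va) va).2 _ hmemItems
  set fl := va.filter (fun p => client_label_map p.1 == k) with hfl
  have hflne : fl ≠ [] := by
    intro hx
    apply hneG
    rw [hG, hx]
    rfl
  obtain ⟨p0, rest, hcons⟩ := List.exists_cons_of_ne_nil hflne
  -- every member of the group is an entry of va whose label maps to k
  have hmem_va : ∀ p ∈ fl, p ∈ va ∧ client_label_map p.1 = k := by
    intro p hp
    rw [hfl] at hp
    have := List.mem_filter.mp hp
    exact ⟨this.1, by simpa using this.2⟩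
  -- the arrays of the group are F of its labels
  have harr : fl.map Prod.snd = (fl.map Prod.fst).map (pvLookup va) := by
    rw [List.map_map]
    apply List.map_congr_left
    intro p hp
    exact (pvLookup_eq va hnd p (hmem_va p hp).1).symm
  -- Pre_: no array of the group is longer than the group's first
  have hle : ∀ l ∈ (fl.map Prod.fst), (pvLookup va l).length ≤
      (pvLookup va ((fl.map Prod.fst).headD "")).length := by
    intro l hl
    obtain ⟨p, hp, rfl⟩ := List.mem_map.mp hl
    obtain ⟨hpva, hpk⟩ := hmem_va p hp
    have h0va : p0 ∈ va ∧ client_label_map p0.1 = k := hmem_va p0 (by rw [hcons]; exact List.mem_cons_self)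
    rw [pvLookup_eq va hnd p hpva]
    rw [hcons]
    simp only [List.map_cons, List.headD_cons]
    rw [pvLookup_eq va hnd p0 h0va.1]
    have := hlen p hpva
    rwa [show (va.filter (fun q => client_label_map q.1 == client_label_map p.1)) = fl by
        rw [hfl, hpk],
      hcons] at this
  rw [hG, hB, harr]
  rw [hcons] at hle ⊢
  simp only [List.map_cons, List.headD_cons] at hle
  have hRA := pvRowArr_eq (pvLookup va) p0.1 (rest.map Prod.fst) (by
    intro l hl
    simpa using hle l (by simpa using hl))
  simp only [List.map_cons] at hRA ⊢
  rw [hRA]
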